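-- pv_equiv track=rewrite | github.com/whdgusdl48/Programmers_Algorithm | Level1/solution_2021_01_23.py | solution
-- ===== SOURCE A (Python) =====
-- def solution(answers):
--     student1 = []
--     student2 = []
--     student3 = []
--     s1_count = 0
--     s2_count = 0
--     s3_count = 0
--
--     for i in range(len(answers)):
--         student1.append(i % 5 + 1)
--     for i in range(len(answers)):
--         if i % 2 == 0:
--             student2.append(2)
--         else:
--             if (8 * i + i) %8 == 1:
--                 student2.append(1)
--             elif (8 * i + i) %8 == 3:
--                 student2.append(3)
--             elif (8 * i + i) %8 == 5:
--                 student2.append(4)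
--             else:
--                 student2.append(5)
--
--     for i in range(len(answers)):
--         if i % 10 == 0 or i% 10 == 1:
--             student3.append(3)
--         elif i % 10 == 2 or i% 10 == 3:
--             student3.append(1)
--         elif i % 10 == 4 or i% 10 == 5:
--             student3.append(2)
--         elif i % 10 == 6 or i% 10 == 7:
--             student3.append(4)
--         else:
--             student3.append(5)
--
--     for i in range(len(answers)):
--         if student1[i] == answers[i]:
--             s1_count = s1_count + 1
--         if student2[i] == answers[i]:
--             s2_count = s2_count + 1
--         if student3[i] == answers[i]:
--             s3_count = s3_count + 1
--
--     a = [s1_count,s2_count,s3_count]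
--     answer = []
--     max_number = max(a)
--     for i in range(len(a)):
--         if a[i] == max_number:
--             answer.append(i + 1)
--     return answer
-- ===== SOURCE B (Python) =====
-- def solution(answers):
--     def matches(pattern, ans):
--         count = 0
--         q = pattern
--         for a in ans:
--             if a == q[0]:
--                 count += 1
--             q = q[1:] + q[:1]
--         return count
--
--     counts = [matches(p, answers)
--               for p in ([1, 2, 3, 4, 5],
--                         [2, 1, 2, 3, 2, 4, 2, 5],
--                         [3, 3, 1, 1, 2, 2, 4, 4, 5, 5])]
--     best = max(counts)
--     return [i + 1 for i, c in enumerate(counts) if c == best]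
-- ===== Notes on version B (the rewrite author's own statement) =====
-- stated objective: simpler
-- what changed: B drops all index arithmetic and the three pre-built answer arrays: a helper walks each pattern as a rotating queue (q = q[1:] + q[:1]) alongside the answers, comparing each answer to the queue head, one independent pass per student, then picks the argmax of the three counts.
import Mathlib
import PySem

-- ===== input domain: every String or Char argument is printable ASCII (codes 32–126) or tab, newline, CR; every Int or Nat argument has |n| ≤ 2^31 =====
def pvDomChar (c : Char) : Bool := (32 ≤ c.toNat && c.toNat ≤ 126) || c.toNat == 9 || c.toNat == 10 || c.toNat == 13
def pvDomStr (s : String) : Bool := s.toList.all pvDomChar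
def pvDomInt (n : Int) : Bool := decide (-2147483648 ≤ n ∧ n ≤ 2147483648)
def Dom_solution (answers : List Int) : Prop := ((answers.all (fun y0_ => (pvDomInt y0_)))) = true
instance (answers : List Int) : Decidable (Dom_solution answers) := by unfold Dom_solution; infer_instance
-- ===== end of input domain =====

-- B replaces A's index arithmetic and pre-built answer arrays by a rotating-queue walk:
-- each pattern is rotated alongside the answers and compared at its head (objective: simpler).

-- ===== PORT A =====
-- literal port of A: build the three student answer lists, then count matches by index,
-- then collect the 1-based indices attaining the maximum count.
def solution (answers : List Int) : List Int :=
  let n := PySem.List.len answers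
  let student1 := (PySem.List.pyRange 0 n 1).foldl
    (fun acc i => acc ++ [PySem.Int.mod i 5 + 1]) []
  let student2 := (PySem.List.pyRange 0 n 1).foldl
    (fun acc i =>
      if PySem.Int.mod i 2 = 0 then acc ++ [2]
      else if PySem.Int.mod (8 * i + i) 8 = 1 then acc ++ [1]
      else if PySem.Int.mod (8 * i + i) 8 = 3 then acc ++ [3]
      else if PySem.Int.mod (8 * i + i) 8 = 5 then acc ++ [4]
      else acc ++ [5]) []
  let student3 := (PySem.List.pyRange 0 n 1).foldl
    (fun acc i =>
      if PySem.Int.mod i 10 = 0 ∨ PySem.Int.mod i 10 = 1 then acc ++ [3]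
      else if PySem.Int.mod i 10 = 2 ∨ PySem.Int.mod i 10 = 3 then acc ++ [1]
      else if PySem.Int.mod i 10 = 4 ∨ PySem.Int.mod i 10 = 5 then acc ++ [2]
      else if PySem.Int.mod i 10 = 6 ∨ PySem.Int.mod i 10 = 7 then acc ++ [4]
      else acc ++ [5]) []
  -- counting loop; Python indexes with i always in range, so pyGetD with default 0 is exact
  let c := (PySem.List.pyRange 0 n 1).foldl
    (fun (c : Int × Int × Int) i =>
      let c1 := if PySem.List.pyGetD student1 i 0 = PySem.List.pyGetD answers i 0 then c.1 + 1 else c.1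
      let c2 := if PySem.List.pyGetD student2 i 0 = PySem.List.pyGetD answers i 0 then c.2.1 + 1 else c.2.1
      let c3 := if PySem.List.pyGetD student3 i 0 = PySem.List.pyGetD answers i 0 then c.2.2 + 1 else c.2.2
      (c1, c2, c3)) (0, 0, 0)
  let a := [c.1, c.2.1, c.2.2]
  -- max(a): a is a nonempty literal list so Python's max returns; getD 0 is exact here
  let max_number := (PySem.List.max? a (fun x => x)).getD 0
  (PySem.List.pyRange 0 (PySem.List.len a) 1).foldl
    (fun acc i => if PySem.List.pyGetD a i 0 = max_number then acc ++ [i + 1] else acc) []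

-- ===== PORT B =====
-- q[1:] + q[:1] of B's helper, step for step
def pvRotStep (q : List Int) : List Int :=
  PySem.List.slice q (some 1) none ++ PySem.List.slice q none (some 1)

-- B's helper `matches`: walk the answers comparing to the rotating queue's head q[0];
-- the queue is always a rotation of a nonempty literal pattern, so q[0] never raises and
-- pyGetD with default 0 is exact here
def pvMatches (pattern : List Int) (ans : List Int) : Int :=
  (ans.foldl
    (fun (s : Int × List Int) a =>
      ((if a = PySem.List.pyGetD s.2 0 0 then s.1 + 1 else s.1), pvRotStep s.2))
    (0, pattern)).1

-- literal port of B (Source B): three rotating-queue passes, then the argmax of the counts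
def solution_alt (answers : List Int) : List Int :=
  let c1 := pvMatches [1, 2, 3, 4, 5] answers
  let c2 := pvMatches [2, 1, 2, 3, 2, 4, 2, 5] answers
  let c3 := pvMatches [3, 3, 1, 1, 2, 2, 4, 4, 5, 5] answers
  let counts : List Int := [c1, c2, c3]
  -- max(counts) on a nonempty literal list; getD 0 is exact
  let best := (PySem.List.max? counts (fun x => x)).getD 0
  (PySem.List.enumerate counts 0).foldl
    (fun acc jc => if jc.2 = best then acc ++ [jc.1 + 1] else acc) []

-- ===== PRECONDITION & SPEC =====
def Spec_solution (answers : List Int) (out : List Int) : Prop := out = solution_alt answers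
instance (answers : List Int) (out : List Int) : Decidable (Spec_solution answers out) := by unfold Spec_solution; infer_instance

-- ===== CLAIM (what is proved, stated in full; the proofs are below) =====
def Claim_equal_solution : Prop := ∀ (answers : List Int), Dom_solution answers → Spec_solution answers (solution answers)

-- ===== LEMMAS AND PROOFS =====

-- the common periodic match count both programs compute
def pvCnt (p : List Int) : List Int → Nat → Int
  | [], _ => 0
  | a :: l, k => (if a = p.getD (k % p.length) 0 then 1 else 0) + pvCnt p l (k + 1)

-- A's three per-index pattern generators, named for the proof
def pvG1 (i : Int) : Int := PySem.Int.mod i 5 + 1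
def pvG2 (i : Int) : Int :=
  if PySem.Int.mod i 2 = 0 then 2
  else if PySem.Int.mod (8 * i + i) 8 = 1 then 1
  else if PySem.Int.mod (8 * i + i) 8 = 3 then 3
  else if PySem.Int.mod (8 * i + i) 8 = 5 then 4
  else 5
def pvG3 (i : Int) : Int :=
  if PySem.Int.mod i 10 = 0 ∨ PySem.Int.mod i 10 = 1 then 3
  else if PySem.Int.mod i 10 = 2 ∨ PySem.Int.mod i 10 = 3 then 1
  else if PySem.Int.mod i 10 = 4 ∨ PySem.Int.mod i 10 = 5 then 2
  else if PySem.Int.mod i 10 = 6 ∨ PySem.Int.mod i 10 = 7 then 4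
  else 5

theorem pvG1_table (i : Int) :
    pvG1 i = PySem.List.pyGetD ([1, 2, 3, 4, 5] : List Int) (PySem.Int.mod i 5) 0 := by
  have h5 : PySem.Int.mod i 5 = i % 5 := PySem.Int.mod_eq_emod_of_pos (by norm_num)
  unfold pvG1
  rw [h5]
  obtain ⟨k, hk, hklt⟩ : ∃ k : Nat, i % 5 = (k : Int) ∧ k < 5 :=
    ⟨(i % 5).toNat, by omega, by omega⟩
  rw [hk]
  interval_cases k <;> decide

theorem pvG2_table (i : Int) :
    pvG2 i = PySem.List.pyGetD ([2, 1, 2, 3, 2, 4, 2, 5] : List Int) (PySem.Int.mod i 8) 0 := by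
  have h8 : PySem.Int.mod i 8 = i % 8 := PySem.Int.mod_eq_emod_of_pos (by norm_num)
  have h9 : PySem.Int.mod (8 * i + i) 8 = (8 * i + i) % 8 := PySem.Int.mod_eq_emod_of_pos (by norm_num)
  have h2 : PySem.Int.mod i 2 = i % 2 := PySem.Int.mod_eq_emod_of_pos (by norm_num)
  have h9i : (8 * i + i) % 8 = i % 8 := by omega
  have h2i : i % 2 = (i % 8) % 2 := by omega
  unfold pvG2
  rw [h8, h9, h2, h9i, h2i]
  obtain ⟨k, hk, hklt⟩ : ∃ k : Nat, i % 8 = (k : Int) ∧ k < 8 :=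
    ⟨(i % 8).toNat, by omega, by omega⟩
  rw [hk]
  interval_cases k <;> decide

theorem pvG3_table (i : Int) :
    pvG3 i = PySem.List.pyGetD ([3, 3, 1, 1, 2, 2, 4, 4, 5, 5] : List Int) (PySem.Int.mod i 10) 0 := by
  have h10 : PySem.Int.mod i 10 = i % 10 := PySem.Int.mod_eq_emod_of_pos (by norm_num)
  unfold pvG3
  rw [h10]
  obtain ⟨k, hk, hklt⟩ : ∃ k : Nat, i % 10 = (k : Int) ∧ k < 10 :=
    ⟨(i % 10).toNat, by omega, by omega⟩
  rw [hk]
  interval_cases k <;> decide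

-- A's merged counting loop, rewritten over enumerate with the pattern tables
theorem pv_counts_eq (answers : List Int) :
    (PySem.List.pyRange 0 (PySem.List.len answers) 1).foldl
      (fun (c : Int × Int × Int) i =>
        ((if PySem.List.pyGetD (List.map pvG1 (PySem.List.pyRange 0 (PySem.List.len answers) 1)) i 0 = PySem.List.pyGetD answers i 0 then c.1 + 1 else c.1),
         (if PySem.List.pyGetD (List.map pvG2 (PySem.List.pyRange 0 (PySem.List.len answers) 1)) i 0 = PySem.List.pyGetD answers i 0 then c.2.1 + 1 else c.2.1),
         (if PySem.List.pyGetD (List.map pvG3 (PySem.List.pyRange 0 (PySem.List.len answers) 1)) i 0 = PySem.List.pyGetD answers i 0 then c.2.2 + 1 else c.2.2))) (0, 0, 0)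
  = (PySem.List.enumerate answers 0).foldl
      (fun (c : Int × Int × Int) ia =>
        ((if ia.2 = PySem.List.pyGetD ([1, 2, 3, 4, 5] : List Int) (PySem.Int.mod ia.1 5) 0 then c.1 + 1 else c.1),
         (if ia.2 = PySem.List.pyGetD ([2, 1, 2, 3, 2, 4, 2, 5] : List Int) (PySem.Int.mod ia.1 8) 0 then c.2.1 + 1 else c.2.1),
         (if ia.2 = PySem.List.pyGetD ([3, 3, 1, 1, 2, 2, 4, 4, 5, 5] : List Int) (PySem.Int.mod ia.1 10) 0 then c.2.2 + 1 else c.2.2))) (0, 0, 0) := by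
  rw [PySem.List.enumerate_eq_map_pyRange answers 0, List.foldl_map]
  refine PySem.List.foldl_congr_mem _ _ _ _ ?_
  intro acc i hi
  obtain ⟨h0, h1⟩ := PySem.List.mem_pyRange_one.mp hi
  dsimp only
  rw [PySem.List.pyGetD_map_pyRange_of_nonneg pvG1 _ i 0 h0 h1,
      PySem.List.pyGetD_map_pyRange_of_nonneg pvG2 _ i 0 h0 h1,
      PySem.List.pyGetD_map_pyRange_of_nonneg pvG3 _ i 0 h0 h1,
      pvG1_table, pvG2_table, pvG3_table]
  simp only [eq_comm]

-- the enumerate fold computes the triple of periodic match counts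
theorem pv_foldA (l : List Int) : ∀ (k : Nat) (c1 c2 c3 : Int),
    (PySem.List.enumerate l (k : Int)).foldl
      (fun (c : Int × Int × Int) ia =>
        ((if ia.2 = PySem.List.pyGetD ([1, 2, 3, 4, 5] : List Int) (PySem.Int.mod ia.1 5) 0 then c.1 + 1 else c.1),
         (if ia.2 = PySem.List.pyGetD ([2, 1, 2, 3, 2, 4, 2, 5] : List Int) (PySem.Int.mod ia.1 8) 0 then c.2.1 + 1 else c.2.1),
         (if ia.2 = PySem.List.pyGetD ([3, 3, 1, 1, 2, 2, 4, 4, 5, 5] : List Int) (PySem.Int.mod ia.1 10) 0 then c.2.2 + 1 else c.2.2))) (c1, c2, c3)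
  = (c1 + pvCnt [1, 2, 3, 4, 5] l k,
     c2 + pvCnt [2, 1, 2, 3, 2, 4, 2, 5] l k,
     c3 + pvCnt [3, 3, 1, 1, 2, 2, 4, 4, 5, 5] l k) := by
  induction l with
  | nil => intro k c1 c2 c3; simp [pvCnt, PySem.List.enumerate_nil]
  | cons a l ih =>
    intro k c1 c2 c3
    rw [PySem.List.enumerate_cons]
    have e5 : PySem.Int.mod (k : Int) 5 = ((k % 5 : Nat) : Int) := by
      exact_mod_cast PySem.Int.mod_natCast k 5
    have e8 : PySem.Int.mod (k : Int) 8 = ((k % 8 : Nat) : Int) := by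
      exact_mod_cast PySem.Int.mod_natCast k 8
    have e10 : PySem.Int.mod (k : Int) 10 = ((k % 10 : Nat) : Int) := by
      exact_mod_cast PySem.Int.mod_natCast k 10
    have hk1 : (k : Int) + 1 = ((k + 1 : Nat) : Int) := by push_cast; ring
    simp only [List.foldl_cons, e5, e8, e10, PySem.List.pyGetD_natCast, hk1]
    rw [ih (k + 1)]
    simp only [pvCnt, List.length_cons, List.length_nil]
    refine Prod.ext ?_ (Prod.ext ?_ ?_) <;> · dsimp only; split_ifs <;> ring

-- the rotating-queue loop of B's helper computes the same periodic match count
theorem pv_foldB (p : List Int) (hp : p ≠ []) (l : List Int) : ∀ (k : Nat) (c : Int),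
    l.foldl
      (fun (s : Int × List Int) a =>
        ((if a = PySem.List.pyGetD s.2 0 0 then s.1 + 1 else s.1), pvRotStep s.2))
      (c, p.rotate k)
  = (c + pvCnt p l k, p.rotate (k + l.length)) := by
  induction l with
  | nil => intro k c; simp [pvCnt]
  | cons a l ih =>
    intro k c
    have hlen : 0 < p.length := List.length_pos_iff.mpr hp
    have hq : 0 < (p.rotate k).length := by simpa using hlen
    have hhead : PySem.List.pyGetD (p.rotate k) 0 0 = p.getD (k % p.length) 0 := by
      rw [PySem.List.pyGetD_zero, List.getD_eq_getElem?_getD, List.getElem?_eq_getElem hq,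
          List.getElem_rotate, List.getD_eq_getElem?_getD,
          List.getElem?_eq_getElem (by exact Nat.mod_lt _ hlen)]
      simp
    have hrot : pvRotStep (p.rotate k) = p.rotate (k + 1) := by
      have h1 : 1 ≤ (p.rotate k).length := hq
      rw [pvRotStep, PySem.List.slice_from_one, PySem.List.slice_to _ (by norm_num)]
      rw [show ((1 : Int)).toNat = 1 from rfl, ← List.drop_one,
          ← List.rotate_eq_drop_append_take h1, List.rotate_rotate]
    simp only [List.foldl_cons, hhead, hrot]
    rw [ih (k + 1)]
    simp only [pvCnt, List.length_cons]
    refine Prod.ext ?_ ?_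
    · dsimp only; split_ifs <;> ring
    · dsimp only; congr 1; omega

theorem pv_foldA0 (l : List Int) :
    (PySem.List.enumerate l 0).foldl
      (fun (c : Int × Int × Int) ia =>
        ((if ia.2 = PySem.List.pyGetD ([1, 2, 3, 4, 5] : List Int) (PySem.Int.mod ia.1 5) 0 then c.1 + 1 else c.1),
         (if ia.2 = PySem.List.pyGetD ([2, 1, 2, 3, 2, 4, 2, 5] : List Int) (PySem.Int.mod ia.1 8) 0 then c.2.1 + 1 else c.2.1),
         (if ia.2 = PySem.List.pyGetD ([3, 3, 1, 1, 2, 2, 4, 4, 5, 5] : List Int) (PySem.Int.mod ia.1 10) 0 then c.2.2 + 1 else c.2.2))) (0, 0, 0)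
  = (pvCnt [1, 2, 3, 4, 5] l 0,
     pvCnt [2, 1, 2, 3, 2, 4, 2, 5] l 0,
     pvCnt [3, 3, 1, 1, 2, 2, 4, 4, 5, 5] l 0) := by
  have h := pv_foldA l 0 0 0 0
  rw [Nat.cast_zero] at h
  simpa using h

theorem pv_matches_eq (p : List Int) (hp : p ≠ []) (l : List Int) :
    pvMatches p l = pvCnt p l 0 := by
  unfold pvMatches
  have := pv_foldB p hp l 0 0
  rw [List.rotate_zero] at this
  rw [this]
  simp

-- the two result-assembly stages agree on any counter triple
theorem pv_final_eq (c1 c2 c3 : Int) :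
    (PySem.List.pyRange 0 (PySem.List.len ([c1, c2, c3] : List Int)) 1).foldl
      (fun acc i => if PySem.List.pyGetD ([c1, c2, c3] : List Int) i 0 = (PySem.List.max? ([c1, c2, c3] : List Int) (fun x => x)).getD 0 then acc ++ [i + 1] else acc) []
  = (PySem.List.enumerate ([c1, c2, c3] : List Int) 0).foldl
      (fun acc jc => if jc.2 = (PySem.List.max? ([c1, c2, c3] : List Int) (fun x => x)).getD 0 then acc ++ [jc.1 + 1] else acc) [] := by
  rw [show PySem.List.len ([c1, c2, c3] : List Int) = 3 by simp [PySem.List.len_eq],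
      show PySem.List.pyRange 0 3 1 = [0, 1, 2] by decide,
      PySem.List.enumerate_cons, PySem.List.enumerate_cons, PySem.List.enumerate_cons,
      PySem.List.enumerate_nil]
  simp [PySem.List.pyGetD, PySem.List.pyGet?, PySem.List.pyIdx?, List.foldl,
        show ((2 : Int)).toNat = 2 from rfl]

theorem solution_eq_alt (answers : List Int) : solution answers = solution_alt answers := by
  simp only [solution, solution_alt]
  rw [PySem.List.foldl_congr_mem (PySem.List.pyRange 0 (PySem.List.len answers) 1)
        (fun acc i => acc ++ [PySem.Int.mod i 5 + 1]) (fun acc i => acc ++ [pvG1 i]) []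
        (fun _ _ _ => rfl),
      PySem.List.foldl_congr_mem (PySem.List.pyRange 0 (PySem.List.len answers) 1)
        (fun acc i =>
          if PySem.Int.mod i 2 = 0 then acc ++ [2]
          else if PySem.Int.mod (8 * i + i) 8 = 1 then acc ++ [1]
          else if PySem.Int.mod (8 * i + i) 8 = 3 then acc ++ [3]
          else if PySem.Int.mod (8 * i + i) 8 = 5 then acc ++ [4]
          else acc ++ [5]) (fun acc i => acc ++ [pvG2 i]) []
        (by intro acc i _; simp only [pvG2]; split_ifs <;> rfl),
      PySem.List.foldl_congr_mem (PySem.List.pyRange 0 (PySem.List.len answers) 1)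
        (fun acc i =>
          if PySem.Int.mod i 10 = 0 ∨ PySem.Int.mod i 10 = 1 then acc ++ [3]
          else if PySem.Int.mod i 10 = 2 ∨ PySem.Int.mod i 10 = 3 then acc ++ [1]
          else if PySem.Int.mod i 10 = 4 ∨ PySem.Int.mod i 10 = 5 then acc ++ [2]
          else if PySem.Int.mod i 10 = 6 ∨ PySem.Int.mod i 10 = 7 then acc ++ [4]
          else acc ++ [5]) (fun acc i => acc ++ [pvG3 i]) []
        (by intro acc i _; simp only [pvG3]; split_ifs <;> rfl)]
  simp only [PySem.List.foldl_append_singleton_eq_map, List.nil_append]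
  rw [pv_counts_eq answers, pv_foldA0 answers,
      pv_matches_eq [1, 2, 3, 4, 5] (by decide) answers,
      pv_matches_eq [2, 1, 2, 3, 2, 4, 2, 5] (by decide) answers,
      pv_matches_eq [3, 3, 1, 1, 2, 2, 4, 4, 5, 5] (by decide) answers]
  exact pv_final_eq _ _ _

-- ===== VERDICT (by name: the statement is the Claim_ definition above) =====
theorem solution_spec : Claim_equal_solution := by
  intro answers _
  unfold Spec_solution
  exact solution_eq_alt answers
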